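-- pv_equiv track=rewrite | github.com/paveleroshkinweb/birds-api | src/controllers/birds.py | find_invalid_param
-- ===== SOURCE A (Python) =====
-- def find_invalid_param(args):
--
--     def is_valid_int(offset):
--         try:
--             offset = int(offset or 1)
--             return offset > 0
--         except ValueError:
--             return False
--
--     whitelists = {
--         'attribute': ['', 'species', 'name', 'color', 'body_length', 'wingspan'],
--         'order': ['', 'asc', 'desc']
--     }
--     hints = {
--         'attribute': f'Please use value from: {" ".join(whitelists["attribute"]).strip()}',
--         'order': f'Please use value from: {" ".join(whitelists["order"]).strip()}',
--         'offset': f'Offset value should be positive integer',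
--         'limit': f'Limit value should be positive integer'
--     }
--     validators = {
--         'attribute': lambda attr: attr in whitelists['attribute'],
--         'order': lambda order: order in whitelists['order'],
--         'offset': is_valid_int,
--         'limit': is_valid_int
--     }
--     for prop, validator in validators.items():
--         if not validator(args.get(prop, '')):
--             return prop, hints[prop]
--     return None, None
-- ===== SOURCE B (Python) =====
-- def find_invalid_param(args):
--     # Inverted strategy: scan the request's own items once, collecting the set of
--     # offending parameter names, then pick the highest-priority offender.
--     # Correct because a parameter absent from args defaults to '' in A, and ''
--     # passes every check, so only keys actually present can be invalid.
--     HINTS = {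
--         'attribute': 'Please use value from: species name color body_length wingspan',
--         'order': 'Please use value from: asc desc',
--         'offset': 'Offset value should be positive integer',
--         'limit': 'Limit value should be positive integer',
--     }
--
--     def valid(prop, value):
--         if prop == 'attribute':
--             return value in ('', 'species', 'name', 'color', 'body_length', 'wingspan')
--         if prop == 'order':
--             return value in ('', 'asc', 'desc')
--         try:
--             return int(value or 1) > 0
--         except ValueError:
--             return False
--
--     invalid = {prop for prop, value in args.items()
--                if prop in HINTS and not valid(prop, value)}
--     for prop in ('attribute', 'order', 'offset', 'limit'):
--         if prop in invalid:
--             return prop, HINTS[prop]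
--     return None, None
-- ===== Notes on version B (the rewrite author's own statement) =====
-- stated objective: alternative
-- what changed: Instead of looping over a validator table and probing args.get for each of the four parameters, B scans the request's own items once, collects the SET of offending parameter names (absent keys default to '' which always passes, so only present keys can offend), and then selects the highest-priority offender from the fixed order.
import Mathlib
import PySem

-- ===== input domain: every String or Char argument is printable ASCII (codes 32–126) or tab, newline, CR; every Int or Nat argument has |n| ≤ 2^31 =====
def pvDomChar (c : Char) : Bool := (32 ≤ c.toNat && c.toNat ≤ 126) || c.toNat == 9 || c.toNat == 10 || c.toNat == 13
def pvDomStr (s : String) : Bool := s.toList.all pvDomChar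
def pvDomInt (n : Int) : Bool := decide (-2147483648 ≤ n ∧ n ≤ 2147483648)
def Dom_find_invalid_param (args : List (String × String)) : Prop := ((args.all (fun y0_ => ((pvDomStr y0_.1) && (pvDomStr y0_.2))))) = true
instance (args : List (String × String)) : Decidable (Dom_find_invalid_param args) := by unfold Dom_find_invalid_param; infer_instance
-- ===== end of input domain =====

-- B inverts the traversal: it scans the request's items once, collects the set of offending
-- parameter names, and picks the highest-priority offender (objective: alternative).

-- ===== PORT A =====
-- inner helper is_valid_int: int(offset or 1) > 0, ValueError → False ('' is the only falsy string)
def pvIsValidIntA (offset : String) : Bool :=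
  match (if offset == "" then some (1 : Int) else PySem.Int.ofStr? offset) with
  | some n => decide (n > 0)
  | none => false

-- the loop 'for prop, validator in validators.items(): …'
def pvLoopA (args : List (String × String)) (hints : PySem.Dict String String) :
    List (String × (String → Bool)) → Option String × Option String
  | [] => (none, none)
  | (prop, validator) :: rest =>
      if !(validator (PySem.Dict.getD (PySem.Dict.ofList args) prop "")) then
        (some prop, PySem.Dict.get? hints prop)   -- hints[prop]; prop is always a key of hints here
      else pvLoopA args hints rest

def find_invalid_param (args : List (String × String)) : Option String × Option String :=
  let whitelists : PySem.Dict String (List String) :=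
    PySem.Dict.ofList [("attribute", ["", "species", "name", "color", "body_length", "wingspan"]),
                       ("order", ["", "asc", "desc"])]
  let hints : PySem.Dict String String :=
    PySem.Dict.ofList
      [("attribute", "Please use value from: " ++
          PySem.Str.strip (PySem.Str.join " " (PySem.Dict.getD whitelists "attribute" []))),
       ("order", "Please use value from: " ++
          PySem.Str.strip (PySem.Str.join " " (PySem.Dict.getD whitelists "order" []))),
       ("offset", "Offset value should be positive integer"),
       ("limit", "Limit value should be positive integer")]
  let validators : List (String × (String → Bool)) :=
    [("attribute", fun attr => (PySem.Dict.getD whitelists "attribute" []).contains attr),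
     ("order", fun order => (PySem.Dict.getD whitelists "order" []).contains order),
     ("offset", pvIsValidIntA),
     ("limit", pvIsValidIntA)]
  pvLoopA args hints validators

-- ===== PORT B =====
-- B's HINTS dict (data only)
def pvHintsB : PySem.Dict String String :=
  PySem.Dict.ofList
    [("attribute", "Please use value from: species name color body_length wingspan"),
     ("order", "Please use value from: asc desc"),
     ("offset", "Offset value should be positive integer"),
     ("limit", "Limit value should be positive integer")]

-- B's valid(prop, value)
def pvValidB (prop value : String) : Bool :=
  if prop == "attribute" then ["", "species", "name", "color", "body_length", "wingspan"].contains value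
  else if prop == "order" then ["", "asc", "desc"].contains value
  else match (if value == "" then some (1 : Int) else PySem.Int.ofStr? value) with
       | some n => decide (n > 0)
       | none => false

-- {prop for prop, value in args.items() if prop in HINTS and not valid(prop, value)}
def pvInvalidB (args : List (String × String)) : List String :=
  PySem.Set.ofList
    (((PySem.Dict.ofList args).items.filter
        (fun q => pvHintsB.contains q.1 && !pvValidB q.1 q.2)).map (·.1))

-- the priority pick 'for prop in (…): if prop in invalid: return prop, HINTS[prop]'
def pvPickB (invalid : List String) : List String → Option String × Option String
  | [] => (none, none)
  | p :: rest =>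
      if invalid.contains p then (some p, PySem.Dict.get? pvHintsB p)
      else pvPickB invalid rest

def find_invalid_param_alt (args : List (String × String)) : Option String × Option String :=
  pvPickB (pvInvalidB args) ["attribute", "order", "offset", "limit"]

-- ===== PRECONDITION & SPEC =====
def Spec_find_invalid_param (args : List (String × String)) (out : Option String × Option String) : Prop := out = find_invalid_param_alt args
instance (args : List (String × String)) (out : Option String × Option String) : Decidable (Spec_find_invalid_param args out) := by unfold Spec_find_invalid_param; infer_instance

-- ===== CLAIM (what is proved, stated in full; the proofs are below) =====
def Claim_equal_find_invalid_param : Prop := ∀ (args : List (String × String)), Dom_find_invalid_param args → Spec_find_invalid_param args (find_invalid_param args)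

-- ===== LEMMAS AND PROOFS =====

-- membership in B's offender set, for a prop that HINTS knows and that '' satisfies:
-- p offends iff its defaulted lookup fails B's check.
theorem pvInvalidB_contains (args : List (String × String)) (p : String)
    (hk : pvHintsB.contains p = true) (he : pvValidB p "" = true) :
    (pvInvalidB args).contains p = !pvValidB p (PySem.Dict.getD (PySem.Dict.ofList args) p "") := by
  have hnd : (PySem.Dict.ofList args).keys.Nodup := PySem.Dict.nodup_keys_ofList args
  unfold pvInvalidB
  rcases hg : (PySem.Dict.ofList args).get? p with _ | v
  · -- key absent: defaulted value is '', which is valid; and p cannot be in the filtered items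
    rw [PySem.Dict.getD_of_get?_eq_none _ "" hg, he]
    simp only [Bool.not_true]
    rw [Bool.eq_false_iff]
    intro hmem
    rw [List.contains_eq_mem, decide_eq_true_iff] at hmem
    rw [PySem.Set.mem_ofList _ _] at hmem
    rcases List.mem_map.mp hmem with ⟨⟨k, v⟩, hin, hfst⟩
    cases hfst
    have := PySem.Dict.get?_of_mem_items _ (List.mem_of_mem_filter hin) hnd
    rw [hg] at this
    simp at this
  · rw [PySem.Dict.getD_of_get?_eq_some _ "" hg]
    have hitems : (p, v) ∈ (PySem.Dict.ofList args).items :=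
      PySem.Dict.mem_items_of_get?_eq_some _ hg
    rcases hv : pvValidB p v with _ | _
    · -- invalid: p is in the set
      simp only [Bool.not_false]
      rw [List.contains_eq_mem, decide_eq_true_iff, PySem.Set.mem_ofList _ _]
      exact List.mem_map.mpr ⟨(p, v), List.mem_filter.mpr ⟨hitems, by simp [hk, hv]⟩, rfl⟩
    · -- valid: p is not in the set (its unique value is v)
      simp only [Bool.not_true]
      rw [Bool.eq_false_iff]
      intro hmem
      rw [List.contains_eq_mem, decide_eq_true_iff, PySem.Set.mem_ofList _ _] at hmem
      rcases List.mem_map.mp hmem with ⟨⟨k, w⟩, hin, hfst⟩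
      cases hfst
      have h1 := PySem.Dict.get?_of_mem_items _ (List.mem_of_mem_filter hin) hnd
      rw [hg] at h1
      cases h1
      have := (List.mem_filter.mp hin).2
      simp [hv] at this

-- B's check coincides with A's validator on each of the four props
theorem pvValidB_attribute (v : String) :
    pvValidB "attribute" v = ["", "species", "name", "color", "body_length", "wingspan"].contains v := by
  simp [pvValidB]

theorem pvValidB_order (v : String) :
    pvValidB "order" v = ["", "asc", "desc"].contains v := by
  simp [pvValidB]

theorem pvValidB_offset (v : String) : pvValidB "offset" v = pvIsValidIntA v := by
  simp [pvValidB, pvIsValidIntA]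

theorem pvValidB_limit (v : String) : pvValidB "limit" v = pvIsValidIntA v := by
  simp [pvValidB, pvIsValidIntA]

-- ===== VERDICT (by name: the statement is the Claim_ definition above) =====
theorem find_invalid_param_spec : Claim_equal_find_invalid_param := by
  intro args _
  unfold Spec_find_invalid_param find_invalid_param find_invalid_param_alt
  simp only [pvPickB,
    show PySem.Dict.get? pvHintsB "attribute"
      = some "Please use value from: species name color body_length wingspan" from by decide,
    show PySem.Dict.get? pvHintsB "order" = some "Please use value from: asc desc" from by decide,
    show PySem.Dict.get? pvHintsB "offset" = some "Offset value should be positive integer" from by decide,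
    show PySem.Dict.get? pvHintsB "limit" = some "Limit value should be positive integer" from by decide,
    pvInvalidB_contains args "attribute" (by decide) (by decide),
    pvInvalidB_contains args "order" (by decide) (by decide),
    pvInvalidB_contains args "offset" (by decide) (by decide),
    pvInvalidB_contains args "limit" (by decide) (by decide),
    pvValidB_attribute, pvValidB_order, pvValidB_offset, pvValidB_limit]
  simp only [pvLoopA,
    show PySem.Dict.getD (PySem.Dict.ofList
        [("attribute", ["", "species", "name", "color", "body_length", "wingspan"]),
         ("order", ["", "asc", "desc"])]) "attribute" []
      = ["", "species", "name", "color", "body_length", "wingspan"] from by decide,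
    show PySem.Dict.getD (PySem.Dict.ofList
        [("attribute", ["", "species", "name", "color", "body_length", "wingspan"]),
         ("order", ["", "asc", "desc"])]) "order" [] = ["", "asc", "desc"] from by decide,
    show PySem.Str.strip (PySem.Str.join " " ["", "species", "name", "color", "body_length", "wingspan"])
      = "species name color body_length wingspan" from by decide,
    show PySem.Str.strip (PySem.Str.join " " ["", "asc", "desc"]) = "asc desc" from by decide]
  simp only [show "Please use value from: " ++ "species name color body_length wingspan"
      = "Please use value from: species name color body_length wingspan" from by decide,
    show "Please use value from: " ++ "asc desc" = "Please use value from: asc desc" from by decide]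
  simp only [
    show PySem.Dict.get? (PySem.Dict.ofList
        [("attribute", "Please use value from: species name color body_length wingspan"),
         ("order", "Please use value from: asc desc"),
         ("offset", "Offset value should be positive integer"),
         ("limit", "Limit value should be positive integer")]) "attribute"
      = some "Please use value from: species name color body_length wingspan" from by decide,
    show PySem.Dict.get? (PySem.Dict.ofList
        [("attribute", "Please use value from: species name color body_length wingspan"),
         ("order", "Please use value from: asc desc"),
         ("offset", "Offset value should be positive integer"),
         ("limit", "Limit value should be positive integer")]) "order" = some "Please use value from: asc desc" from by decide,
    show PySem.Dict.get? (PySem.Dict.ofList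
        [("attribute", "Please use value from: species name color body_length wingspan"),
         ("order", "Please use value from: asc desc"),
         ("offset", "Offset value should be positive integer"),
         ("limit", "Limit value should be positive integer")]) "offset" = some "Offset value should be positive integer" from by decide,
    show PySem.Dict.get? (PySem.Dict.ofList
        [("attribute", "Please use value from: species name color body_length wingspan"),
         ("order", "Please use value from: asc desc"),
         ("offset", "Offset value should be positive integer"),
         ("limit", "Limit value should be positive integer")]) "limit"
      = some "Limit value should be positive integer" from by decide]
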